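-- pv_equiv track=rewrite | github.com/qtc-de/vve | python/vve/encode.py | encode_html_full
-- ===== SOURCE A (Python) =====
-- def encode_html_full(data):
--     '''
--     Applies HTML encoding to the complete input data. The input data
--     can be specified as string or bytes. If specified as bytes, it is
--     treated as utf-8 and each byte gets encoded seperately.
--
--     Parameters:
--         string              (string/bytes)      Input string
--
--     Returns:
--         string              (string)            HTML encoded output
--     '''
--     if not isinstance(data, bytes):
--         data = data.encode('utf-8')
--
--     hex_form = data.hex()
--     return_value = ''
--
--     for i in range(0, len(hex_form), 2):
--         return_value += '&#x' + hex_form[i:i+2] + ';'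
--
--     return return_value
-- ===== SOURCE B (Python) =====
-- def encode_html_full(data):
--     '''
--     Applies HTML encoding to the complete input data. The input data
--     can be specified as string or bytes. If specified as bytes, it is
--     treated as utf-8 and each byte gets encoded seperately.
--
--     Parameters:
--         string              (string/bytes)      Input string
--
--     Returns:
--         string              (string)            HTML encoded output
--     '''
--     if not isinstance(data, bytes):
--         data = data.encode('utf-8')
--
--     return ''.join(f'&#x{b:02x};' for b in data)
-- ===== Notes on version B (the rewrite author's own statement) =====
-- stated objective: idiomatic
-- what changed: B drops the intermediate data.hex() string and the index loop over 2-char slices, instead formatting each raw byte value directly as f'&#x{b:02x};' and joining the pieces.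
import Mathlib
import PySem

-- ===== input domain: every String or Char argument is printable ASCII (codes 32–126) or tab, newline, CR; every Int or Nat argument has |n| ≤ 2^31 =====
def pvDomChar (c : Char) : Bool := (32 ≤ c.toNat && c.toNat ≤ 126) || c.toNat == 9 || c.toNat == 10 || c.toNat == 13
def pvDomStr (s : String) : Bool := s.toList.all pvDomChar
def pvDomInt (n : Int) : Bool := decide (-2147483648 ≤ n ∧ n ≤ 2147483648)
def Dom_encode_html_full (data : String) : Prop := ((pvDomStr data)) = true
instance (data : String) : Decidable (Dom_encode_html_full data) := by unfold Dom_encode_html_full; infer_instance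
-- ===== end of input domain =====

-- B replaces A's intermediate data.hex() string and index loop over 2-char slices by
-- formatting each raw byte directly and joining (idiomatic; same O(n) byte pass).
-- On the ASCII domain, str.encode('utf-8') is one byte per char with value c.toNat.

-- one lowercase hex digit (exact for 0 ≤ n < 16, as both Pythons produce)
def pvHexDigit (n : Nat) : Char := if n < 10 then Char.ofNat (48 + n) else Char.ofNat (87 + n)

-- ===== PORT A =====
-- data.hex(): two lowercase hex digits per byte, concatenated
def pvHexForm (l : List Char) : List Char :=
  l.flatMap (fun c => [pvHexDigit (c.toNat / 16), pvHexDigit (c.toNat % 16)])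

def encode_html_full (data : String) : String :=
  let hexForm := pvHexForm data.toList
  let returnValue :=
    (PySem.List.pyRange 0 ((hexForm.length : Int)) 2).foldl
      (fun acc i =>
        acc ++ ('&' :: '#' :: 'x' :: PySem.List.slice hexForm (some i) (some (i + 2))) ++ [';'])
      []
  String.ofList returnValue

-- ===== PORT B =====
-- ''.join(f'&#x{b:02x};' for b in data): format each byte value directly
def encode_html_full_alt (data : String) : String :=
  String.ofList (data.toList.flatMap
    (fun c => '&' :: '#' :: 'x' :: pvHexDigit (c.toNat / 16) :: pvHexDigit (c.toNat % 16) :: [';']))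

-- ===== PRECONDITION & SPEC =====
def Spec_encode_html_full (data : String) (out : String) : Prop := out = encode_html_full_alt data
instance (data : String) (out : String) : Decidable (Spec_encode_html_full data out) := by unfold Spec_encode_html_full; infer_instance

-- ===== CLAIM (what is proved, stated in full; the proofs are below) =====
def Claim_equal_encode_html_full : Prop := ∀ (data : String), Dom_encode_html_full data → Spec_encode_html_full data (encode_html_full data)

-- ===== LEMMAS AND PROOFS =====

lemma pvHexForm_length (l : List Char) : (pvHexForm l).length = 2 * l.length := by
  induction l with
  | nil => simp [pvHexForm]
  | cons c t ih => simp [pvHexForm] at ih ⊢; omega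

lemma pvHexForm_drop (l : List Char) (k : Nat) :
    (pvHexForm l).drop (2 * k) = pvHexForm (l.drop k) := by
  induction l generalizing k with
  | nil => simp [pvHexForm]
  | cons c t ih =>
    cases k with
    | zero => simp
    | succ k =>
      have h2 : 2 * (k + 1) = (2 * k) + 1 + 1 := by omega
      simp [pvHexForm, h2, List.drop_succ_cons] at ih ⊢
      simpa [pvHexForm] using ih k

lemma pvCount (n : Nat) : (if (0:Int) < ((2 * n : Nat) : Int) then
    ((((2 * n : Nat) : Int) - 0 + 2 - 1) / 2).toNat else 0) = n := by
  by_cases h : n = 0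
  · simp [h]
  · rw [if_pos (by push_cast; omega)]
    omega

lemma pvKey (l : List Char) :
    (PySem.List.pyRange 0 ((pvHexForm l).length : Int) 2).foldl
      (fun acc i =>
        acc ++ ('&' :: '#' :: 'x' :: PySem.List.slice (pvHexForm l) (some i) (some (i + 2))) ++ [';'])
      [] =
    l.flatMap
      (fun c => '&' :: '#' :: 'x' :: pvHexDigit (c.toNat / 16) :: pvHexDigit (c.toNat % 16) :: [';']) := by
  rw [PySem.List.pyRange_of_pos 0 _ (by norm_num : (0:Int) < 2), List.foldl_map]
  rw [pvHexForm_length, pvCount]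
  induction l using List.reverseRecOn with
  | nil => simp
  | append_singleton t c ih =>
    rw [List.length_append, List.length_singleton, List.range_succ, List.foldl_append,
        List.flatMap_append]
    -- the last step appends the encoding of the last char
    have hslice : ∀ (m : List Char) (j : Nat),
        PySem.List.slice m (some ((0:Int) + 2 * (j:Int))) (some ((0:Int) + 2 * (j:Int) + 2)) =
        (m.drop (2 * j)).take 2 := by
      intro m j
      have h1 : ((0:Int) + 2 * (j:Int)) = ((2 * j : Nat) : Int) := by push_cast; ring
      have h2 : ((0:Int) + 2 * (j:Int) + 2) = ((2 * j : Nat) : Int) + ((2:Nat) : Int) := by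
        push_cast; ring
      rw [h2, h1, PySem.List.slice_natCast_add]
    have hstep : ∀ j, j < t.length →
        PySem.List.slice (pvHexForm (t ++ [c])) (some ((0:Int) + 2 * (j:Int)))
          (some ((0:Int) + 2 * (j:Int) + 2)) =
        PySem.List.slice (pvHexForm t) (some ((0:Int) + 2 * (j:Int)))
          (some ((0:Int) + 2 * (j:Int) + 2)) := by
      intro j hj
      rw [hslice, hslice, pvHexForm_drop, pvHexForm_drop,
          List.drop_append_of_le_length (by omega)]
      have happ : pvHexForm (t.drop j ++ [c]) = pvHexForm (t.drop j) ++ pvHexForm [c] := by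
        simp [pvHexForm]
      rw [happ, List.take_append_of_le_length (by rw [pvHexForm_length]; simp; omega)]
    have hfold_congr :
        (List.range t.length).foldl
          (fun (acc : List Char) (k : Nat) =>
            acc ++ ('&' :: '#' :: 'x' ::
              PySem.List.slice (pvHexForm (t ++ [c])) (some ((0:Int) + 2 * (k:Int)))
                (some ((0:Int) + 2 * (k:Int) + 2))) ++ [';']) [] =
        (List.range t.length).foldl
          (fun (acc : List Char) (k : Nat) =>
            acc ++ ('&' :: '#' :: 'x' ::
              PySem.List.slice (pvHexForm t) (some ((0:Int) + 2 * (k:Int)))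
                (some ((0:Int) + 2 * (k:Int) + 2))) ++ [';']) [] := by
      apply PySem.List.foldl_congr_mem
      intro acc k hk
      rw [hstep k (List.mem_range.mp hk)]
    rw [hfold_congr, ih]
    have hlast : PySem.List.slice (pvHexForm (t ++ [c])) (some ((0:Int) + 2 * (t.length:Int)))
        (some ((0:Int) + 2 * (t.length:Int) + 2)) =
        [pvHexDigit (c.toNat / 16), pvHexDigit (c.toNat % 16)] := by
      rw [hslice, pvHexForm_drop, List.drop_append_of_le_length (by omega), List.drop_length]
      simp [pvHexForm]
    simp only [List.foldl_cons, List.foldl_nil]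
    rw [hlast]
    simp

-- ===== VERDICT (by name: the statement is the Claim_ definition above) =====
theorem encode_html_full_spec : Claim_equal_encode_html_full := by
  intro data _hd
  unfold Spec_encode_html_full encode_html_full encode_html_full_alt
  simp only
  rw [pvKey]
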